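-- pv_equiv track=rewrite | github.com/tempotec/AutoPLM | migrate_templates.py | find_style_boundaries
-- ===== SOURCE A (Python) =====
-- def find_style_boundaries(lines):
--     """Find the <style> and </style> tag positions"""
--     style_start = None
--     style_end = None
--     for i, line in enumerate(lines):
--         if '<style>' in line and style_start is None:
--             style_start = i
--         if '</style>' in line and style_start is not None:
--             style_end = i
--             break
--     return style_start, style_end
-- ===== SOURCE B (Python) =====
-- def find_style_boundaries(lines):
--     """Find the <style> and </style> tag positions"""
--     # Single backwards sweep: walking right-to-left, keep the nearest '</style>'
--     # index seen so far (i.e. the first end tag at or after the current line);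
--     # every '<style>' line overwrites the answer, so the leftmost start wins.
--     ans = (None, None)
--     nearest_end = None
--     for i in range(len(lines) - 1, -1, -1):
--         line = lines[i]
--         if '</style>' in line:
--             nearest_end = i
--         if '<style>' in line:
--             ans = (i, nearest_end)
--     return ans
-- ===== Notes on version B (the rewrite author's own statement) =====
-- stated objective: alternative
-- what changed: Replaced A's forward state-machine (find start, then keep scanning for the end, break) with a single right-to-left sweep that maintains the nearest '</style>' index to the right and lets each '<style>' line overwrite the answer, so the leftmost start paired with its following end falls out at the end of the sweep.
import Mathlib
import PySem

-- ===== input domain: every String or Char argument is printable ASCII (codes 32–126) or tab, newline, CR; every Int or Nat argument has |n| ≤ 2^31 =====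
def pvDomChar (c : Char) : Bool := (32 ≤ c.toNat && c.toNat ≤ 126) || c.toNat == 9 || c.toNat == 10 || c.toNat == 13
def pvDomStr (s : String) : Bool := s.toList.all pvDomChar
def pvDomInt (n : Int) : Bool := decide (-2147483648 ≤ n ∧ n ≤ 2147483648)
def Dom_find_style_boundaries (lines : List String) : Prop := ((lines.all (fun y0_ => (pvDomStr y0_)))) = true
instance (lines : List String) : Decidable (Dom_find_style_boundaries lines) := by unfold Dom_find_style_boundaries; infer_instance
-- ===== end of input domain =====

-- B replaces A's forward break-on-end state machine by a single right-to-left sweep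
-- carrying the nearest following '</style>' index (alternative algorithm, same cost).

-- ===== PORT A =====
-- A's for-loop with break, carried as structural recursion over the lines with the
-- running index i and the mutable state style_start (style_end exists only at the break/return).
def pvLoopA : List String → Int → Option Int → Option Int × Option Int
  | [], _, ss => (ss, none)
  | l :: rest, i, ss =>
    let ss' := if PySem.Str.isIn "<style>" l && ss.isNone then some i else ss
    if PySem.Str.isIn "</style>" l && ss'.isSome then (ss', some i)
    else pvLoopA rest (i + 1) ss'

def find_style_boundaries (lines : List String) : Option Int × Option Int :=
  pvLoopA lines 0 none

-- ===== PORT B =====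
-- Source B's backwards for-loop: the recursion processes the tail (higher indices) first,
-- then the head line at index i, exactly mirroring i = len-1 … 0; the carried pair is
-- (ans, nearest_end) as in Source B.
def pvLoopB : List String → Int → (Option Int × Option Int) × Option Int
  | [], _ => ((none, none), none)
  | l :: rest, i =>
    let (ans, ne) := pvLoopB rest (i + 1)
    let ne' := if PySem.Str.isIn "</style>" l then some i else ne
    let ans' := if PySem.Str.isIn "<style>" l then (some i, ne') else ans
    (ans', ne')

def find_style_boundaries_alt (lines : List String) : Option Int × Option Int :=
  (pvLoopB lines 0).1

-- ===== PRECONDITION & SPEC =====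
def Spec_find_style_boundaries (lines : List String) (out : Option Int × Option Int) : Prop := out = find_style_boundaries_alt lines
instance (lines : List String) (out : Option Int × Option Int) : Decidable (Spec_find_style_boundaries lines out) := by unfold Spec_find_style_boundaries; infer_instance

-- ===== CLAIM =====
def Claim_equal_find_style_boundaries : Prop := ∀ (lines : List String), Dom_find_style_boundaries lines → Spec_find_style_boundaries lines (find_style_boundaries lines)

-- ===== LEMMAS AND PROOFS =====
-- Proof-only characterisations: first '<style>' index from i, and first '</style>' index ≥ start.
def pvStartSearch : List String → Int → Option Int
  | [], _ => none
  | l :: rest, i => if PySem.Str.isIn "<style>" l then some i else pvStartSearch rest (i + 1)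

def pvEndSearch (start : Int) : List String → Int → Option Int
  | [], _ => none
  | l :: rest, i =>
    if start ≤ i && PySem.Str.isIn "</style>" l then some i
    else pvEndSearch start rest (i + 1)

theorem pvStartSearch_ge : ∀ (ls : List String) (i s : Int), pvStartSearch ls i = some s → i ≤ s := by
  intro ls
  induction ls with
  | nil => intro i s h; simp [pvStartSearch] at h
  | cons l rest ih =>
    intro i s h
    simp only [pvStartSearch] at h
    split at h
    · simp only [Option.some.injEq] at h; omega
    · have := ih (i + 1) s h; omega

theorem pvEndSearch_congr : ∀ (ls : List String) (i s s' : Int), s ≤ i → s' ≤ i →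
    pvEndSearch s ls i = pvEndSearch s' ls i := by
  intro ls
  induction ls with
  | nil => intro i s s' _ _; simp [pvEndSearch]
  | cons l rest ih =>
    intro i s s' hs hs'
    simp [pvEndSearch, show s ≤ i from hs, show s' ≤ i from hs',
      ih (i + 1) s s' (by omega) (by omega)]

theorem pvLoopA_some : ∀ (ls : List String) (i s : Int), s ≤ i →
    pvLoopA ls i (some s) = (some s, pvEndSearch s ls i) := by
  intro ls
  induction ls with
  | nil => intro i s _; simp [pvLoopA, pvEndSearch]
  | cons l rest ih =>
    intro i s hs
    by_cases h : PySem.Chars.isIn ['<', '/', 's', 't', 'y', 'l', 'e', '>'] l.toList = true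
    · simp [pvLoopA, pvEndSearch, h, hs]
    · simp [pvLoopA, pvEndSearch, h, hs, ih (i + 1) s (by omega)]

theorem pvLoopA_none : ∀ (ls : List String) (i : Int),
    pvLoopA ls i none =
      match pvStartSearch ls i with
      | none => (none, none)
      | some s => (some s, pvEndSearch s ls i) := by
  intro ls
  induction ls with
  | nil => intro i; simp [pvLoopA, pvStartSearch]
  | cons l rest ih =>
    intro i
    by_cases hst : PySem.Chars.isIn ['<', 's', 't', 'y', 'l', 'e', '>'] l.toList = true
    · by_cases hend : PySem.Chars.isIn ['<', '/', 's', 't', 'y', 'l', 'e', '>'] l.toList = true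
      · simp [pvLoopA, pvStartSearch, pvEndSearch, hst, hend]
      · simp [pvLoopA, pvStartSearch, pvEndSearch, hst, hend,
          pvLoopA_some rest (i + 1) i (by omega)]
    · rw [show pvLoopA (l :: rest) i none = pvLoopA rest (i + 1) none from by
        simp [pvLoopA, hst]]
      rw [ih (i + 1)]
      cases hs : pvStartSearch rest (i + 1) with
      | none => simp [pvStartSearch, hst, hs]
      | some s =>
        have hge := pvStartSearch_ge rest (i + 1) s hs
        simp [pvStartSearch, hst, hs, pvEndSearch, show ¬ s ≤ i from by omega]

theorem pvLoopB_char : ∀ (ls : List String) (i : Int),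
    pvLoopB ls i =
      ((match pvStartSearch ls i with
        | none => ((none : Option Int), (none : Option Int))
        | some s => (some s, pvEndSearch s ls i)), pvEndSearch i ls i) := by
  intro ls
  induction ls with
  | nil => intro i; simp [pvLoopB, pvStartSearch, pvEndSearch]
  | cons l rest ih =>
    intro i
    have hrec : pvLoopB (l :: rest) i =
        (let (ans, ne) := pvLoopB rest (i + 1)
         let ne' := if PySem.Str.isIn "</style>" l then some i else ne
         let ans' := if PySem.Str.isIn "<style>" l then (some i, ne') else ans
         (ans', ne')) := rfl
    rw [hrec, ih (i + 1)]
    have hEcongr : pvEndSearch (i + 1) rest (i + 1) = pvEndSearch i rest (i + 1) :=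
      pvEndSearch_congr rest (i + 1) (i + 1) i (by omega) (by omega)
    by_cases hst : PySem.Chars.isIn ['<', 's', 't', 'y', 'l', 'e', '>'] l.toList = true
    · by_cases hend : PySem.Chars.isIn ['<', '/', 's', 't', 'y', 'l', 'e', '>'] l.toList = true
      · simp [pvStartSearch, pvEndSearch, hst, hend]
      · simp [pvStartSearch, pvEndSearch, hst, hend, hEcongr]
    · by_cases hend : PySem.Chars.isIn ['<', '/', 's', 't', 'y', 'l', 'e', '>'] l.toList = true
      · cases hs : pvStartSearch rest (i + 1) with
        | none => simp [pvStartSearch, pvEndSearch, hst, hend, hs]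
        | some s =>
          have hge := pvStartSearch_ge rest (i + 1) s hs
          simp [pvStartSearch, pvEndSearch, hst, hend, hs, show ¬ s ≤ i from by omega]
      · cases hs : pvStartSearch rest (i + 1) with
        | none => simp [pvStartSearch, pvEndSearch, hst, hend, hs, hEcongr]
        | some s =>
          have hge := pvStartSearch_ge rest (i + 1) s hs
          simp [pvStartSearch, pvEndSearch, hst, hend, hs, hEcongr,
            show ¬ s ≤ i from by omega]

-- ===== VERDICT =====
theorem find_style_boundaries_spec : Claim_equal_find_style_boundaries := by
  intro lines _
  unfold Spec_find_style_boundaries find_style_boundaries find_style_boundaries_alt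
  rw [pvLoopA_none lines 0, pvLoopB_char lines 0]
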